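-- pv_equiv track=rewrite | github.com/SI206-UMich/hw-4-fall2021-ksanjeev17 | H1 - 2 copy.py | get_index_max
-- ===== SOURCE A (Python) =====
-- def get_index_max(nums):
--
--     # init the max and max_index
--     max = 0
--     max_index = -1
--
--     # loop through the list
--     for index in range(len(nums)):
--
--         # get the current value
--         current = nums[index]
--
--         # if new max
--         if current < max:
--
--             # reset max and max index
--             max = current
--             max_index = index
--
--     return max_index
-- ===== SOURCE B (Python) =====
-- def get_index_max(nums):
--     if not nums:
--         return -1
--     m = min(nums)
--     if m < 0:
--         return nums.index(m)
--     return -1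
-- ===== Notes on version B (the rewrite author's own statement) =====
-- stated objective: simpler
-- what changed: Replaces the fused running-minimum scan carrying (max, max_index) state with a reduce-then-locate decomposition: min() to find the value, then list.index() to find its first position, with an explicit empty/non-negative guard.
import Mathlib
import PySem

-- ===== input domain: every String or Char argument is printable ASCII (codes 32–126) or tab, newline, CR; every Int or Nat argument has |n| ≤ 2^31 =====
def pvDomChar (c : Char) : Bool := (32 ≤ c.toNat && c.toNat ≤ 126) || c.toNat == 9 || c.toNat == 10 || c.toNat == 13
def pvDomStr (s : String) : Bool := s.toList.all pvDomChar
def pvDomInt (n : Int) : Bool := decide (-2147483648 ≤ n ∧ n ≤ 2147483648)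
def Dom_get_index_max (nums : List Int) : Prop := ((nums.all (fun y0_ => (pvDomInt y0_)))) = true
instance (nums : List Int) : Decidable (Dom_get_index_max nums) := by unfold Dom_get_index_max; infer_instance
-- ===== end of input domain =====

-- B replaces A's fused running-minimum scan (state (max, max_index)) with a
-- reduce-then-locate decomposition: min() then first index, guarded for the
-- empty/non-negative cases (objective: simpler).


-- ===== PORT A =====
-- the for-loop over indices: state (max, max_index), i is the current index
def gimLoopA : List Int → Int → Int → Int → Int
| [], _, _, max_index => max_index
| current :: rest, i, max, max_index =>
    if current < max then gimLoopA rest (i + 1) current i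
    else gimLoopA rest (i + 1) max max_index

def get_index_max (nums : List Int) : Int := gimLoopA nums 0 0 (-1)

-- ===== PORT B =====
def get_index_max_alt (nums : List Int) : Int :=
  if nums = [] then -1
  else
    match PySem.List.min? nums (fun x => x) with
    | none => -1
    | some m => if m < 0 then ((PySem.List.index? nums m).getD 0 : Nat) else -1

-- ===== PRECONDITION & SPEC =====
def Spec_get_index_max (nums : List Int) (out : Int) : Prop := out = get_index_max_alt nums
instance (nums : List Int) (out : Int) : Decidable (Spec_get_index_max nums out) := by unfold Spec_get_index_max; infer_instance

-- ===== CLAIM (what is proved, stated in full; the proofs are below) =====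
def Claim_equal_get_index_max : Prop := ∀ (nums : List Int), Dom_get_index_max nums → Spec_get_index_max nums (get_index_max nums)

-- ===== LEMMAS AND PROOFS =====

-- proof helper: the (minimum below mx, its first index) pair A's loop tracks
def gimFm : List Int → Int → Option (Int × Nat)
| [], _ => none
| x :: xs, mx =>
    if x < mx then
      match gimFm xs x with
      | none => some (x, 0)
      | some (m, j) => some (m, j + 1)
    else
      match gimFm xs mx with
      | none => none
      | some (m, j) => some (m, j + 1)

theorem gimLoopA_eq_fm : ∀ (l : List Int) (i mx mi : Int),
    gimLoopA l i mx mi = match gimFm l mx with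
      | none => mi
      | some (_, j) => i + (j : Int) := by
  intro l
  induction l with
  | nil => intro i mx mi; simp [gimLoopA, gimFm]
  | cons x xs ih =>
    intro i mx mi
    by_cases h : x < mx
    · simp only [gimLoopA, gimFm, if_pos h, ih]
      cases hfm : gimFm xs x with
      | none => simp
      | some p => cases p with | mk m j => push_cast; ring_nf
    · simp only [gimLoopA, gimFm, if_neg h, ih]
      cases hfm : gimFm xs mx with
      | none => simp
      | some p => cases p with | mk m j => push_cast; ring_nf

theorem gimFm_none : ∀ (l : List Int) (mx : Int),
    gimFm l mx = none ↔ ∀ x ∈ l, mx ≤ x := by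
  intro l
  induction l with
  | nil => intro mx; simp [gimFm]
  | cons x xs ih =>
    intro mx
    by_cases h : x < mx
    · simp only [gimFm, if_pos h]
      constructor
      · intro hc
        exfalso
        cases hfm : gimFm xs x with
        | none => rw [hfm] at hc; simp at hc
        | some p => cases p with | mk m j => rw [hfm] at hc; simp at hc
      · intro hall
        exact absurd h (not_lt.mpr (hall x List.mem_cons_self))
    · simp only [gimFm, if_neg h]
      cases hfm : gimFm xs mx with
      | none =>
        simp only [List.mem_cons]
        constructor
        · intro _ y hy
          rcases hy with rfl | hy
          · exact not_lt.mp h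
          · exact (ih mx).mp hfm y hy
        · intro _; trivial
      | some p =>
        cases p with | mk m j =>
        simp only [List.mem_cons]
        constructor
        · intro hc; exact absurd hc (by simp)
        · intro hall
          have hnone : gimFm xs mx = none := (ih mx).mpr (fun y hy => hall y (Or.inr hy))
          rw [hnone] at hfm; exact absurd hfm (by simp)

theorem gimFm_some : ∀ (l : List Int) (mx m : Int) (j : Nat),
    gimFm l mx = some (m, j) →
      m < mx ∧ m ∈ l ∧ (∀ x ∈ l, m ≤ x) ∧ PySem.List.index? l m = some j := by
  intro l
  induction l with
  | nil => intro mx m j hc; simp [gimFm] at hc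
  | cons x xs ih =>
    intro mx m j h
    by_cases hx : x < mx
    · simp only [gimFm, if_pos hx] at h
      cases hfm : gimFm xs x with
      | none =>
        rw [hfm] at h
        simp only [Option.some.injEq, Prod.mk.injEq] at h
        obtain ⟨rfl, rfl⟩ := h
        have hall : ∀ y ∈ xs, x ≤ y := (gimFm_none xs x).mp hfm
        refine ⟨hx, List.mem_cons_self, ?_, PySem.List.index?_cons_self x xs⟩
        intro y hy; rcases List.mem_cons.mp hy with rfl | hy
        · exact le_refl _
        · exact hall y hy
      | some p =>
        cases p with | mk m' j' =>
        rw [hfm] at h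
        simp only [Option.some.injEq, Prod.mk.injEq] at h
        obtain ⟨rfl, rfl⟩ := h
        obtain ⟨hlt, hmem, hall, hidx⟩ := ih x m' j' hfm
        have hne : x ≠ m' := fun he => absurd (he ▸ hlt) (lt_irrefl _)
        refine ⟨lt_trans hlt hx, List.mem_cons_of_mem _ hmem, ?_, ?_⟩
        · intro y hy; rcases List.mem_cons.mp hy with rfl | hy
          · exact le_of_lt hlt
          · exact hall y hy
        · rw [PySem.List.index?_cons_of_ne xs hne, hidx]; rfl
    · simp only [gimFm, if_neg hx] at h
      cases hfm : gimFm xs mx with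
      | none => rw [hfm] at h; exact absurd h (by simp)
      | some p =>
        cases p with | mk m' j' =>
        rw [hfm] at h
        simp only [Option.some.injEq, Prod.mk.injEq] at h
        obtain ⟨rfl, rfl⟩ := h
        obtain ⟨hlt, hmem, hall, hidx⟩ := ih mx m' j' hfm
        have hne : x ≠ m' := fun he =>
          absurd (he ▸ (not_lt.mp hx)) (not_le.mpr hlt)
        refine ⟨hlt, List.mem_cons_of_mem _ hmem, ?_, ?_⟩
        · intro y hy; rcases List.mem_cons.mp hy with rfl | hy
          · exact le_trans (le_of_lt hlt) (not_lt.mp hx)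
          · exact hall y hy
        · rw [PySem.List.index?_cons_of_ne xs hne, hidx]; rfl

-- ===== VERDICT (by name: the statement is the Claim_ definition above) =====
theorem get_index_max_spec : Claim_equal_get_index_max := by
  intro nums _
  unfold Spec_get_index_max get_index_max get_index_max_alt
  rw [gimLoopA_eq_fm]
  by_cases hne : nums = []
  · subst hne; simp [gimFm]
  · rw [if_neg hne]
    cases hmin : PySem.List.min? nums (fun x => x) with
    | none => exact absurd ((PySem.List.min?_eq_none_iff nums (fun x => x)).mp hmin) hne
    | some m0 =>
      have hm0mem : m0 ∈ nums := PySem.List.min?_mem hmin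
      cases hfm : gimFm nums 0 with
      | none =>
        have h0 : (0 : Int) ≤ m0 := (gimFm_none nums 0).mp hfm m0 hm0mem
        simp [not_lt.mpr h0]
      | some p =>
        cases p with | mk m j =>
        obtain ⟨hlt, hmem, hall, hidx⟩ := gimFm_some nums 0 m j hfm
        have h1 : m0 ≤ m := PySem.List.min?_isMin hmin m hmem
        have h2 : m ≤ m0 := hall m0 hm0mem
        have he : m0 = m := le_antisymm h1 h2
        subst he
        have hidx' : List.idxOf? m0 nums = some j := by simpa using hidx
        simp [hlt, hidx']
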